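-- pv_equiv track=rewrite | github.com/naturalstupid/PyJHora | hora/horoscope/chart/ashtakavarga.py | _get_planet_positions
-- ===== SOURCE A (Python) =====
-- planet_list = ['sun','moon','mars','mercury','jupiter','venus','saturn','lagnam']
--
-- def _get_planet_positions(chart_1d):
--     planet_houses = [-1 for p in range(7)]
--     for p,planet in enumerate(planet_list[0:-1]): # Excluding Lagnam
--         for house,rasi in enumerate(chart_1d):
--             if planet.lower() in rasi.lower():
--                 planet_houses[p] = house
--                 break
--     return planet_houses
-- ===== SOURCE B (Python) =====
-- planet_list = ['sun','moon','mars','mercury','jupiter','venus','saturn','lagnam']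
--
-- def _get_planet_positions(chart_1d):
--     # single pass over the houses: fill every still-unset planet slot per house
--     names = planet_list[:7]
--     houses = [-1] * 7
--     for house, rasi in enumerate(chart_1d):
--         low = rasi.lower()
--         houses = [house if v == -1 and n in low else v
--                   for v, n in zip(houses, names)]
--     return houses
-- ===== Notes on version B (the rewrite author's own statement) =====
-- stated objective: alternative
-- what changed: B makes one pass over the houses, filling each planet's still-unset slot on first match, instead of A's seven separate scans of the chart (one per planet).
import Mathlib
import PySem

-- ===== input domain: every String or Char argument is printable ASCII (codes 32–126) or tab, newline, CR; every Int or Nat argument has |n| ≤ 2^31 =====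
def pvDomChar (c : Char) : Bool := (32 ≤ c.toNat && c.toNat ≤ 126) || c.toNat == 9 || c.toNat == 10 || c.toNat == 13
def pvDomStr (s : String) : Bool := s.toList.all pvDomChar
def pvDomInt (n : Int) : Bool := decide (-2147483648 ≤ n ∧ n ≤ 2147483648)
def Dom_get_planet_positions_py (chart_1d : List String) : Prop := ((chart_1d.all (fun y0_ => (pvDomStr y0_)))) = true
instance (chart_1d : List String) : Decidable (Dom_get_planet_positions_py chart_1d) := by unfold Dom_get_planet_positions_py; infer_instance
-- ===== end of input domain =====

-- B replaces A's seven per-planet scans of the chart with a single pass over the houses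
-- that fills each planet's still-unset slot; alternative decomposition, same exact result.
-- ===== PORT A =====
def pvPlanetList : List String :=
  ["sun", "moon", "mars", "mercury", "jupiter", "venus", "saturn", "lagnam"]

-- A's inner 'for house,rasi ... break' loop
def pvInnerA (planet : String) : List (Int × String) → Option Int
  | [] => none
  | (house, rasi) :: rest =>
      if PySem.Str.isIn (PySem.Str.lower planet) (PySem.Str.lower rasi) then some house
      else pvInnerA planet rest

def get_planet_positions_py (chart_1d : List String) : List Int :=
  (PySem.List.enumerate (PySem.List.slice pvPlanetList (some 0) (some (-1)))).foldl
    (fun acc pp =>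
      match pvInnerA pp.2 (PySem.List.enumerate chart_1d) with
      | some house => acc.set pp.1.toNat house
      | none => acc)
    (List.replicate 7 (-1))

-- ===== PORT B =====
def get_planet_positions_py_alt (chart_1d : List String) : List Int :=
  let names := PySem.List.slice pvPlanetList none (some 7)
  (PySem.List.enumerate chart_1d).foldl
    (fun acc hr =>
      let low := PySem.Str.lower hr.2
      (acc.zip names).map (fun pv =>
        if pv.1 == -1 && PySem.Str.isIn pv.2 low then hr.1 else pv.1))
    (List.replicate 7 (-1))

-- ===== PRECONDITION & SPEC =====
def Spec_get_planet_positions_py (chart_1d : List String) (out : List Int) : Prop := out = get_planet_positions_py_alt chart_1d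
instance (chart_1d : List String) (out : List Int) : Decidable (Spec_get_planet_positions_py chart_1d out) := by unfold Spec_get_planet_positions_py; infer_instance

-- ===== CLAIM (what is proved, stated in full; the proofs are below) =====
def Claim_equal_get_planet_positions_py : Prop := ∀ (chart_1d : List String), Dom_get_planet_positions_py chart_1d → Spec_get_planet_positions_py chart_1d (get_planet_positions_py chart_1d)

-- ===== LEMMAS AND PROOFS =====
-- B's inner condition (planet name used verbatim, it is already lowercase)
def pvInnerB (pl : String) : List (Int × String) → Option Int
  | [] => none
  | (house, rasi) :: rest =>
      if PySem.Str.isIn pl (PySem.Str.lower rasi) then some house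
      else pvInnerB pl rest

def pvValOf : Option Int → Int
  | some h => h
  | none => -1

def pvCb (v : Int) (pl : String) (pairs : List (Int × String)) : Int :=
  if v = -1 then pvValOf (pvInnerB pl pairs) else v

def pvStepB (acc : List Int) (hr : Int × String) : List Int :=
  (acc.zip (PySem.List.slice pvPlanetList none (some 7))).map (fun pv =>
    if pv.1 == -1 && PySem.Str.isIn pv.2 (PySem.Str.lower hr.2) then hr.1 else pv.1)

lemma pvCb_step (v : Int) (pl : String) (house : Int) (hh : 0 ≤ house) (rasi : String)
    (rest : List (Int × String)) :
    pvCb (if v == -1 && PySem.Str.isIn pl (PySem.Str.lower rasi) then house else v) pl rest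
      = pvCb v pl ((house, rasi) :: rest) := by
  cases hc : PySem.Str.isIn pl (PySem.Str.lower rasi) <;>
    by_cases hv : v = -1 <;>
      simp only [pvCb, pvInnerB, pvValOf, hv, hc] <;>
      simp <;>
      first
        | rfl
        | omega

lemma pvB_key (pairs : List (Int × String)) (hnn : ∀ q ∈ pairs, 0 ≤ q.1)
    (a0 a1 a2 a3 a4 a5 a6 : Int) :
    pairs.foldl pvStepB [a0, a1, a2, a3, a4, a5, a6]
      = [pvCb a0 "sun" pairs, pvCb a1 "moon" pairs, pvCb a2 "mars" pairs,
         pvCb a3 "mercury" pairs, pvCb a4 "jupiter" pairs, pvCb a5 "venus" pairs,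
         pvCb a6 "saturn" pairs] := by
  induction pairs generalizing a0 a1 a2 a3 a4 a5 a6 with
  | nil => simp [pvCb, pvInnerB, pvValOf]
  | cons hd tl ih =>
      obtain ⟨house, rasi⟩ := hd
      have hh : 0 ≤ house := hnn (house, rasi) (by simp)
      have hnn' : ∀ q ∈ tl, 0 ≤ q.1 := fun q hq => hnn q (by simp [hq])
      simp only [List.foldl_cons]
      have hstep : pvStepB [a0, a1, a2, a3, a4, a5, a6] (house, rasi)
          = [(if a0 == -1 && PySem.Str.isIn "sun" (PySem.Str.lower rasi) then house else a0),
             (if a1 == -1 && PySem.Str.isIn "moon" (PySem.Str.lower rasi) then house else a1),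
             (if a2 == -1 && PySem.Str.isIn "mars" (PySem.Str.lower rasi) then house else a2),
             (if a3 == -1 && PySem.Str.isIn "mercury" (PySem.Str.lower rasi) then house else a3),
             (if a4 == -1 && PySem.Str.isIn "jupiter" (PySem.Str.lower rasi) then house else a4),
             (if a5 == -1 && PySem.Str.isIn "venus" (PySem.Str.lower rasi) then house else a5),
             (if a6 == -1 && PySem.Str.isIn "saturn" (PySem.Str.lower rasi) then house else a6)] := by
        rfl
      rw [hstep, ih hnn']
      simp only [pvCb_step a0 "sun" house hh rasi tl, pvCb_step a1 "moon" house hh rasi tl,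
        pvCb_step a2 "mars" house hh rasi tl, pvCb_step a3 "mercury" house hh rasi tl,
        pvCb_step a4 "jupiter" house hh rasi tl, pvCb_step a5 "venus" house hh rasi tl,
        pvCb_step a6 "saturn" house hh rasi tl]

lemma pvInner_eq (pl : String) (hl : PySem.Str.lower pl = pl) :
    ∀ pairs, pvInnerB pl pairs = pvInnerA pl pairs := by
  intro pairs
  induction pairs with
  | nil => rfl
  | cons hd tl ih =>
      obtain ⟨house, rasi⟩ := hd
      simp [pvInnerA, pvInnerB, hl, ih]

lemma pv_enum_nonneg (xs : List String) : ∀ q ∈ PySem.List.enumerate xs, 0 ≤ q.1 := by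
  intro q hq
  rcases (PySem.List.mem_enumerate_iff _ _ _).1 hq with ⟨k, hk, rfl⟩
  simp

lemma pvA_eq (chart : List String) :
    get_planet_positions_py chart
      = [pvValOf (pvInnerA "sun" (PySem.List.enumerate chart)),
         pvValOf (pvInnerA "moon" (PySem.List.enumerate chart)),
         pvValOf (pvInnerA "mars" (PySem.List.enumerate chart)),
         pvValOf (pvInnerA "mercury" (PySem.List.enumerate chart)),
         pvValOf (pvInnerA "jupiter" (PySem.List.enumerate chart)),
         pvValOf (pvInnerA "venus" (PySem.List.enumerate chart)),
         pvValOf (pvInnerA "saturn" (PySem.List.enumerate chart))] := by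
  have h : PySem.List.enumerate (PySem.List.slice pvPlanetList (some 0) (some (-1)))
      = [((0:Int), "sun"), (1, "moon"), (2, "mars"), (3, "mercury"), (4, "jupiter"),
         (5, "venus"), (6, "saturn")] := by decide
  simp only [get_planet_positions_py, h, List.foldl]
  rcases h0 : pvInnerA "sun" (PySem.List.enumerate chart) with _ | x0 <;>
  rcases h1 : pvInnerA "moon" (PySem.List.enumerate chart) with _ | x1 <;>
  rcases h2 : pvInnerA "mars" (PySem.List.enumerate chart) with _ | x2 <;>
  rcases h3 : pvInnerA "mercury" (PySem.List.enumerate chart) with _ | x3 <;>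
  rcases h4 : pvInnerA "jupiter" (PySem.List.enumerate chart) with _ | x4 <;>
  rcases h5 : pvInnerA "venus" (PySem.List.enumerate chart) with _ | x5 <;>
  rcases h6 : pvInnerA "saturn" (PySem.List.enumerate chart) with _ | x6 <;>
  simp [pvValOf, List.set]

lemma pvB_eq (chart : List String) :
    get_planet_positions_py_alt chart
      = (PySem.List.enumerate chart).foldl pvStepB (List.replicate 7 (-1)) := rfl

-- ===== VERDICT (by name: the statement is the Claim_ definition above) =====
theorem get_planet_positions_py_spec : Claim_equal_get_planet_positions_py := by
  intro chart _
  show get_planet_positions_py chart = get_planet_positions_py_alt chart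
  rw [pvA_eq, pvB_eq]
  have : List.replicate 7 (-1 : Int) = [-1, -1, -1, -1, -1, -1, -1] := rfl
  rw [this, pvB_key (PySem.List.enumerate chart) (pv_enum_nonneg chart)]
  simp [pvCb, pvInner_eq "sun" (by decide), pvInner_eq "moon" (by decide),
    pvInner_eq "mars" (by decide), pvInner_eq "mercury" (by decide),
    pvInner_eq "jupiter" (by decide), pvInner_eq "venus" (by decide),
    pvInner_eq "saturn" (by decide)]
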